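-- pv_equiv track=rewrite | github.com/ChuOZhen/-minecraft-wiki | scripts/apply_v4_fixes.py | sort_key_item
-- ===== SOURCE A (Python) =====
-- COLORS = {
--     'white': '白', 'orange': '橙', 'magenta': '品红', 'light_blue': '淡蓝',
--     'yellow': '黄', 'lime': '黄绿', 'pink': '粉红', 'gray': '灰',
--     'light_gray': '淡灰', 'cyan': '青', 'purple': '紫', 'blue': '蓝',
--     'brown': '棕', 'green': '绿', 'red': '红', 'black': '黑',
-- }
--
-- WOOD_TYPES = {
--     'oak': '橡木', 'spruce': '云杉', 'birch': '白桦', 'jungle': '丛林',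
--     'acacia': '金合欢', 'dark_oak': '深色橡木', 'mangrove': '红树',
--     'cherry': '樱花', 'pale_oak': '苍白橡木', 'bamboo': '竹',
--     'crimson': '绯红', 'warped': '诡异',
-- }
--
-- def sort_key_item(item_id):
--     MATERIAL = {'wooden': 1, 'stone': 2, 'iron': 3, 'golden': 4, 'gold': 4, 'diamond': 5, 'netherite': 6}
--     for mat, order in MATERIAL.items():
--         if item_id.startswith(mat + '_'):
--             return (order, item_id)
--     COLOR_ORDER = {c: i for i, c in enumerate(COLORS.keys())}
--     for color, order in COLOR_ORDER.items():
--         if item_id.startswith(color + '_'):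
--             return (100 + order, item_id)
--     WOOD_ORDER = {w: i for i, w in enumerate(WOOD_TYPES.keys())}
--     for wood, order in WOOD_ORDER.items():
--         if item_id.startswith(wood + '_'):
--             return (400 + order, item_id)
--     return (500, item_id)
-- ===== SOURCE B (Python) =====
-- # One flat prefix->code table (material/color/wood codes precomputed); split once, hash-lookup
-- # the one-token head then the two-token prefix. Correct because the 35 keys are pairwise
-- # distinct across the three tables, so precedence never matters.
-- ITEM_CODE = {
--     'wooden': 1, 'stone': 2, 'iron': 3, 'golden': 4, 'gold': 4, 'diamond': 5, 'netherite': 6,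
--     'white': 100, 'orange': 101, 'magenta': 102, 'light_blue': 103,
--     'yellow': 104, 'lime': 105, 'pink': 106, 'gray': 107,
--     'light_gray': 108, 'cyan': 109, 'purple': 110, 'blue': 111,
--     'brown': 112, 'green': 113, 'red': 114, 'black': 115,
--     'oak': 400, 'spruce': 401, 'birch': 402, 'jungle': 403,
--     'acacia': 404, 'dark_oak': 405, 'mangrove': 406,
--     'cherry': 407, 'pale_oak': 408, 'bamboo': 409,
--     'crimson': 410, 'warped': 411,
-- }
--
-- def sort_key_item(item_id):
--     toks = item_id.split('_')
--     if len(toks) >= 2: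
--         code = ITEM_CODE.get(toks[0])
--         if code is None and len(toks) >= 3:
--             code = ITEM_CODE.get(toks[0] + '_' + toks[1])
--         if code is not None:
--             return (code, item_id)
--     return (500, item_id)
-- ===== Notes on version B (the rewrite author's own statement) =====
-- stated objective: idiomatic
-- what changed: A rebuilds three dicts per call and scans all 35 material/color/wood keys with startswith; B splits item_id once on '_' and hash-looks-up the one-token head and then the two-token prefix in a single precomputed module-level code table (precedence is irrelevant because the 35 keys are pairwise distinct).
import Mathlib
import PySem

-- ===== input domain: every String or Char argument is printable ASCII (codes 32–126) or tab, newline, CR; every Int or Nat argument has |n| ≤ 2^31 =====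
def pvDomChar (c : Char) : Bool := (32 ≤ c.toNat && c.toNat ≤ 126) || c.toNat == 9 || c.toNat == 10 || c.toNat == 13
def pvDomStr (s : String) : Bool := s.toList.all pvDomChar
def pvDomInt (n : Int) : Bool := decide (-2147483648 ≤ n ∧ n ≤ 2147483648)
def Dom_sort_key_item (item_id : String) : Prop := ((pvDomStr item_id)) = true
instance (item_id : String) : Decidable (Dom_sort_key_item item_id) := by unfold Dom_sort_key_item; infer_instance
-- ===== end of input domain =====

-- B replaces A's 35 per-call startswith scans (over three dicts rebuilt each call) by one split
-- on '_' and a hash lookup of the one- and two-token prefixes in a single precomputed code table.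

-- ===== PORT A =====
-- the "for k, v in D.items(): if item_id.startswith(k + '_'): return v" loop of A
def pvFindPrefix (s : List Char) : List (List Char × Int) → Option Int
  | [] => none
  | (k, v) :: rest => if PySem.Chars.startswith s (k ++ ['_']) then some v else pvFindPrefix s rest

-- MATERIAL.items()
def pvMaterialItems : List (List Char × Int) :=
  [(['w', 'o', 'o', 'd', 'e', 'n'], 1),
   (['s', 't', 'o', 'n', 'e'], 2),
   (['i', 'r', 'o', 'n'], 3),
   (['g', 'o', 'l', 'd', 'e', 'n'], 4),
   (['g', 'o', 'l', 'd'], 4),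
   (['d', 'i', 'a', 'm', 'o', 'n', 'd'], 5),
   (['n', 'e', 't', 'h', 'e', 'r', 'i', 't', 'e'], 6)]

-- COLOR_ORDER.items() = enumerate(COLORS.keys())
def pvColorOrderItems : List (List Char × Int) :=
  [(['w', 'h', 'i', 't', 'e'], 0),
   (['o', 'r', 'a', 'n', 'g', 'e'], 1),
   (['m', 'a', 'g', 'e', 'n', 't', 'a'], 2),
   (['l', 'i', 'g', 'h', 't', '_', 'b', 'l', 'u', 'e'], 3),
   (['y', 'e', 'l', 'l', 'o', 'w'], 4),
   (['l', 'i', 'm', 'e'], 5),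
   (['p', 'i', 'n', 'k'], 6),
   (['g', 'r', 'a', 'y'], 7),
   (['l', 'i', 'g', 'h', 't', '_', 'g', 'r', 'a', 'y'], 8),
   (['c', 'y', 'a', 'n'], 9),
   (['p', 'u', 'r', 'p', 'l', 'e'], 10),
   (['b', 'l', 'u', 'e'], 11),
   (['b', 'r', 'o', 'w', 'n'], 12),
   (['g', 'r', 'e', 'e', 'n'], 13),
   (['r', 'e', 'd'], 14),
   (['b', 'l', 'a', 'c', 'k'], 15)]

-- WOOD_ORDER.items() = enumerate(WOOD_TYPES.keys())
def pvWoodOrderItems : List (List Char × Int) :=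
  [(['o', 'a', 'k'], 0),
   (['s', 'p', 'r', 'u', 'c', 'e'], 1),
   (['b', 'i', 'r', 'c', 'h'], 2),
   (['j', 'u', 'n', 'g', 'l', 'e'], 3),
   (['a', 'c', 'a', 'c', 'i', 'a'], 4),
   (['d', 'a', 'r', 'k', '_', 'o', 'a', 'k'], 5),
   (['m', 'a', 'n', 'g', 'r', 'o', 'v', 'e'], 6),
   (['c', 'h', 'e', 'r', 'r', 'y'], 7),
   (['p', 'a', 'l', 'e', '_', 'o', 'a', 'k'], 8),
   (['b', 'a', 'm', 'b', 'o', 'o'], 9),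
   (['c', 'r', 'i', 'm', 's', 'o', 'n'], 10),
   (['w', 'a', 'r', 'p', 'e', 'd'], 11)]

def sort_key_item (item_id : String) : Int × String :=
  match pvFindPrefix item_id.toList pvMaterialItems with
  | some order => (order, item_id)
  | none =>
    match pvFindPrefix item_id.toList pvColorOrderItems with
    | some order => (100 + order, item_id)
    | none =>
      match pvFindPrefix item_id.toList pvWoodOrderItems with
      | some order => (400 + order, item_id)
      | none => (500, item_id)

-- ===== PORT B =====
-- the module-level ITEM_CODE dict of Source B (all codes precomputed)
def pvItemCode : PySem.Dict (List Char) Int := PySem.Dict.ofList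
  [("wooden".toList, 1),
   ("stone".toList, 2),
   ("iron".toList, 3),
   ("golden".toList, 4),
   ("gold".toList, 4),
   ("diamond".toList, 5),
   ("netherite".toList, 6),
   ("white".toList, 100),
   ("orange".toList, 101),
   ("magenta".toList, 102),
   ("light_blue".toList, 103),
   ("yellow".toList, 104),
   ("lime".toList, 105),
   ("pink".toList, 106),
   ("gray".toList, 107),
   ("light_gray".toList, 108),
   ("cyan".toList, 109),
   ("purple".toList, 110),
   ("blue".toList, 111),
   ("brown".toList, 112),
   ("green".toList, 113),
   ("red".toList, 114),
   ("black".toList, 115),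
   ("oak".toList, 400),
   ("spruce".toList, 401),
   ("birch".toList, 402),
   ("jungle".toList, 403),
   ("acacia".toList, 404),
   ("dark_oak".toList, 405),
   ("mangrove".toList, 406),
   ("cherry".toList, 407),
   ("pale_oak".toList, 408),
   ("bamboo".toList, 409),
   ("crimson".toList, 410),
   ("warped".toList, 411)]

def sort_key_item_alt (item_id : String) : Int × String :=
  match PySem.Chars.splitOn item_id.toList ['_'] with   -- toks = item_id.split('_')
  | head :: t1 :: ts =>                                 -- len(toks) >= 2
    -- code = ITEM_CODE.get(toks[0]); if None and len(toks) >= 3: code = ITEM_CODE.get(toks[0]+'_'+toks[1])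
    let code0 := pvItemCode.get? head
    let code := if code0 = none ∧ 1 ≤ ts.length then pvItemCode.get? (head ++ '_' :: t1) else code0
    match code with
    | some c => (c, item_id)
    | none => (500, item_id)
  | _ => (500, item_id)

-- ===== PRECONDITION & SPEC =====
def Spec_sort_key_item (item_id : String) (out : Int × String) : Prop := out = sort_key_item_alt item_id
instance (item_id : String) (out : Int × String) : Decidable (Spec_sort_key_item item_id out) := by unfold Spec_sort_key_item; infer_instance

-- ===== CLAIM (what is proved, stated in full; the proofs are below) =====
def Claim_equal_sort_key_item : Prop := ∀ (item_id : String), Dom_sort_key_item item_id → Spec_sort_key_item item_id (sort_key_item item_id)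

-- ===== LEMMAS AND PROOFS =====

-- reference recursion for s.split('_')
def pvUsplit : List Char → List (List Char)
  | [] => [[]]
  | c :: r =>
    if c = '_' then [] :: pvUsplit r
    else match pvUsplit r with
      | [] => [[c]]
      | h :: t => (c :: h) :: t

theorem pvUsplit_ne_nil (s : List Char) : pvUsplit s ≠ [] := by
  cases s with
  | nil => simp [pvUsplit]
  | cons c r =>
    simp only [pvUsplit]
    split_ifs
    · simp
    · rcases h : pvUsplit r with _ | ⟨h1, t1⟩ <;> simp

theorem pvGo_eq (fuel : Nat) : ∀ (l cur : List Char) (acc : List (List Char)), l.length < fuel →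
    PySem.Chars.splitOn.go ['_'] fuel l cur acc
      = acc.reverse ++ ((pvUsplit l).modifyHead (cur.reverse ++ ·)) := by
  induction fuel with
  | zero => intro l cur acc h; omega
  | succ n ih =>
    intro l cur acc h
    cases l with
    | nil => simp [PySem.Chars.splitOn.go, pvUsplit]
    | cons c r =>
      simp only [PySem.Chars.splitOn.go, List.isPrefixOf, List.length_cons] at *
      by_cases hc : c = '_'
      · subst hc
        simp only [BEq.rfl, Bool.true_and, if_pos, List.drop_succ_cons, List.length_nil,
          List.drop_zero]
        rw [ih r [] _ (by omega)]
        simp only [pvUsplit, if_pos rfl, List.reverse_nil, List.nil_append, List.reverse_cons,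
          List.modifyHead_cons, List.append_assoc, List.singleton_append, List.append_nil]
        rcases pvUsplit r with _ | ⟨h1, t1⟩ <;> simp
      · rw [if_neg (by simp [hc, Ne.symm hc])]
        rw [ih r (c :: cur) acc (by omega)]
        rcases hr : pvUsplit r with _ | ⟨h1, t1⟩
        · exact absurd hr (pvUsplit_ne_nil r)
        · simp [pvUsplit, hc, hr]

theorem pvSplitOn_eq (s : List Char) : PySem.Chars.splitOn s ['_'] = pvUsplit s := by
  rw [PySem.Chars.splitOn, pvGo_eq (s.length + 1) s [] [] (by omega)]
  rcases h : pvUsplit s with _ | ⟨h1, t1⟩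
  · exact absurd h (pvUsplit_ne_nil s)
  · simp

theorem pvUsplit_no_underscore (s : List Char) : ∀ t ∈ pvUsplit s, '_' ∉ t := by
  induction s with
  | nil => simp [pvUsplit]
  | cons c r ih =>
    simp only [pvUsplit]
    split_ifs with hc
    · simpa using ih
    · rcases hr : pvUsplit r with _ | ⟨h1, t1⟩
      · exact absurd hr (pvUsplit_ne_nil r)
      · rw [hr] at ih
        intro t htm
        rcases List.mem_cons.mp htm with h | h
        · subst h
          intro hmem
          rcases List.mem_cons.mp hmem with h' | h'
          · exact hc h'.symm
          · exact ih h1 (List.mem_cons_self) h'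
        · exact ih t (List.mem_cons_of_mem _ h)

theorem pvKey_prefix_iff (k : List Char) : ∀ s : List Char,
    ((k ++ ['_']) <+: s) ↔ (pvUsplit k <+: pvUsplit s ∧ (pvUsplit k).length < (pvUsplit s).length) := by
  induction k with
  | nil =>
    intro s
    cases s with
    | nil => simp [pvUsplit]
    | cons c r =>
      by_cases hc : c = '_'
      · subst hc
        have h1 := pvUsplit_ne_nil r
        rcases hr : pvUsplit r with _ | ⟨h2, t2⟩
        · simp_all
        · simp [pvUsplit, hr, List.cons_prefix_cons]
      · rcases hr : pvUsplit r with _ | ⟨h2, t2⟩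
        · exact absurd hr (pvUsplit_ne_nil r)
        · simp [pvUsplit, hc, hr, List.cons_prefix_cons, Ne.symm hc]
  | cons a k' ih =>
    intro s
    cases s with
    | nil =>
      constructor
      · intro h; exact absurd (List.eq_nil_of_prefix_nil h) (by simp)
      · rintro ⟨-, hlen⟩
        have hk := pvUsplit_ne_nil (a :: k')
        rcases hx : pvUsplit (a :: k') with _ | ⟨h1, t1⟩
        · exact absurd hx hk
        · rw [hx] at hlen; simp [pvUsplit] at hlen
    | cons c r =>
      by_cases ha : a = '_' <;> by_cases hc : c = '_'
      · subst ha; subst hc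
        rw [show ('_' :: k') ++ ['_'] = '_' :: (k' ++ ['_']) by simp]
        simp only [List.cons_prefix_cons, pvUsplit, if_pos rfl]
        rw [ih r]
        simp [List.cons_prefix_cons]
      · subst ha
        rcases hr : pvUsplit r with _ | ⟨h2, t2⟩
        · exact absurd hr (pvUsplit_ne_nil r)
        · simp [pvUsplit, hc, hr, List.cons_prefix_cons, Ne.symm hc]
      · subst hc
        rcases hk : pvUsplit k' with _ | ⟨h2, t2⟩
        · exact absurd hk (pvUsplit_ne_nil k')
        · simp [pvUsplit, ha, hk, List.cons_prefix_cons, ha]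
      · rcases hk : pvUsplit k' with _ | ⟨h2, t2⟩
        · exact absurd hk (pvUsplit_ne_nil k')
        · rcases hr : pvUsplit r with _ | ⟨h3, t3⟩
          · exact absurd hr (pvUsplit_ne_nil r)
          · have hihr := ih r
            rw [hk, hr] at hihr
            simp only [pvUsplit, if_neg ha, if_neg hc, hk, hr, List.cons_append,
              List.cons_prefix_cons, List.cons_eq_cons, List.length_cons, hihr]
            tauto

theorem pvStartswith_key (s k : List Char) :
    PySem.Chars.startswith s (k ++ ['_'])
      = ((pvUsplit k).isPrefixOf (pvUsplit s) && decide ((pvUsplit k).length < (pvUsplit s).length)) := by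
  rw [Bool.eq_iff_iff]
  simp [PySem.Chars.startswith_iff, List.isPrefixOf_iff_prefix, pvKey_prefix_iff]

theorem pvJoin2_eq_iff (t1 t2 a b : List Char) (ht : '_' ∉ t1) (ha : '_' ∉ a) :
    (t1 ++ '_' :: t2 = a ++ '_' :: b) ↔ (t1 = a ∧ t2 = b) := by
  induction t1 generalizing a with
  | nil =>
    cases a with
    | nil => simp
    | cons x a' =>
      simp only [List.mem_cons, not_or] at ha
      constructor
      · intro h
        rw [List.nil_append, List.cons_append] at h
        exact absurd (List.cons_eq_cons.mp h).1 ha.1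
      · rintro ⟨h, -⟩; simp at h
  | cons c t1' ih =>
    simp only [List.mem_cons, not_or] at ht
    cases a with
    | nil =>
      constructor
      · intro h
        rw [List.cons_append, List.nil_append] at h
        exact absurd (List.cons_eq_cons.mp h).1 (fun he => ht.1 he.symm)
      · rintro ⟨h, -⟩; simp at h
    | cons x a' =>
      simp only [List.mem_cons, not_or] at ha
      simp [List.cons_append, List.cons_eq_cons, ih a' ht.2 ha.2, and_assoc]

set_option maxRecDepth 20000 in
theorem pvItemCode_eq : pvItemCode = PySem.Dict.mk
  [(['w', 'o', 'o', 'd', 'e', 'n'], 1),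
   (['s', 't', 'o', 'n', 'e'], 2),
   (['i', 'r', 'o', 'n'], 3),
   (['g', 'o', 'l', 'd', 'e', 'n'], 4),
   (['g', 'o', 'l', 'd'], 4),
   (['d', 'i', 'a', 'm', 'o', 'n', 'd'], 5),
   (['n', 'e', 't', 'h', 'e', 'r', 'i', 't', 'e'], 6),
   (['w', 'h', 'i', 't', 'e'], 100),
   (['o', 'r', 'a', 'n', 'g', 'e'], 101),
   (['m', 'a', 'g', 'e', 'n', 't', 'a'], 102),
   (['l', 'i', 'g', 'h', 't', '_', 'b', 'l', 'u', 'e'], 103),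
   (['y', 'e', 'l', 'l', 'o', 'w'], 104),
   (['l', 'i', 'm', 'e'], 105),
   (['p', 'i', 'n', 'k'], 106),
   (['g', 'r', 'a', 'y'], 107),
   (['l', 'i', 'g', 'h', 't', '_', 'g', 'r', 'a', 'y'], 108),
   (['c', 'y', 'a', 'n'], 109),
   (['p', 'u', 'r', 'p', 'l', 'e'], 110),
   (['b', 'l', 'u', 'e'], 111),
   (['b', 'r', 'o', 'w', 'n'], 112),
   (['g', 'r', 'e', 'e', 'n'], 113),
   (['r', 'e', 'd'], 114),
   (['b', 'l', 'a', 'c', 'k'], 115),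
   (['o', 'a', 'k'], 400),
   (['s', 'p', 'r', 'u', 'c', 'e'], 401),
   (['b', 'i', 'r', 'c', 'h'], 402),
   (['j', 'u', 'n', 'g', 'l', 'e'], 403),
   (['a', 'c', 'a', 'c', 'i', 'a'], 404),
   (['d', 'a', 'r', 'k', '_', 'o', 'a', 'k'], 405),
   (['m', 'a', 'n', 'g', 'r', 'o', 'v', 'e'], 406),
   (['c', 'h', 'e', 'r', 'r', 'y'], 407),
   (['p', 'a', 'l', 'e', '_', 'o', 'a', 'k'], 408),
   (['b', 'a', 'm', 'b', 'o', 'o'], 409),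
   (['c', 'r', 'i', 'm', 's', 'o', 'n'], 410),
   (['w', 'a', 'r', 'p', 'e', 'd'], 411)] := by decide

set_option maxHeartbeats 4000000 in
theorem pvMain (s : String) : sort_key_item s = sort_key_item_alt s := by
  have hnu := pvUsplit_no_underscore s.toList
  rcases h : pvUsplit s.toList with _ | ⟨t1, _ | ⟨t2, ts⟩⟩
  · exact absurd h (pvUsplit_ne_nil s.toList)
  · -- single token: every prefix test of A fails, B takes its len(toks) < 2 branch
    have hf : ∀ k : List Char, PySem.Chars.startswith s.toList (k ++ ['_']) = false := by
      intro k
      rw [pvStartswith_key, h]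
      have := pvUsplit_ne_nil k
      simp_all [Nat.lt_one_iff, List.length_eq_zero_iff]
    simp only [sort_key_item, pvFindPrefix, pvMaterialItems, pvColorOrderItems,
      pvWoodOrderItems, hf]
    simp [sort_key_item_alt, pvSplitOn_eq, h]
  · -- toks = t1 :: t2 :: ts
    have ht1 : '_' ∉ t1 := hnu t1 (by rw [h]; exact List.mem_cons_self)
    have hsingle : ∀ k : List Char, pvUsplit k = [k] →
        PySem.Chars.startswith s.toList (k ++ ['_']) = (k == t1) := by
      intro k hk
      rw [pvStartswith_key, h, hk]
      simp [List.isPrefixOf, decide_eq_true (show 1 < ts.length + 2 by omega)]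
    have hdouble : ∀ k a b : List Char, pvUsplit k = [a, b] → k = a ++ '_' :: b →
        PySem.Chars.startswith s.toList (k ++ ['_'])
          = (a == t1 && (b == t2 && decide (1 ≤ ts.length))) := by
      intro k a b hk _
      rw [pvStartswith_key, h, hk]
      rcases ts with _ | ⟨t3, ts'⟩
      · simp [List.isPrefixOf]
      · simp [List.isPrefixOf, decide_eq_true (show 2 < ts'.length + 3 by omega),
          decide_eq_true (show 1 ≤ ts'.length + 1 by omega)]
    have hbdouble : ∀ k a b : List Char, k = a ++ '_' :: b → ('_' ∉ a) →
        (k == t1 ++ '_' :: t2) = (a == t1 && b == t2) := by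
      intro k a b hk hu
      subst hk
      rw [Bool.eq_iff_iff]
      simp only [beq_iff_eq, Bool.and_eq_true]
      rw [eq_comm, pvJoin2_eq_iff t1 t2 a b ht1 hu]
      tauto
    have hdf : ∀ k : List Char, '_' ∈ k → (k == t1) = false := by
      intro k hk
      exact beq_eq_false_iff_ne.mpr (fun he => ht1 (he ▸ hk))
    have hsf : ∀ k : List Char, '_' ∉ k → (k == t1 ++ '_' :: t2) = false := by
      intro k hk
      refine beq_eq_false_iff_ne.mpr (fun he => hk ?_)
      rw [he]; simp
    have hs_wooden := hsingle ['w', 'o', 'o', 'd', 'e', 'n'] (by decide)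
    have hs_stone := hsingle ['s', 't', 'o', 'n', 'e'] (by decide)
    have hs_iron := hsingle ['i', 'r', 'o', 'n'] (by decide)
    have hs_golden := hsingle ['g', 'o', 'l', 'd', 'e', 'n'] (by decide)
    have hs_gold := hsingle ['g', 'o', 'l', 'd'] (by decide)
    have hs_diamond := hsingle ['d', 'i', 'a', 'm', 'o', 'n', 'd'] (by decide)
    have hs_netherite := hsingle ['n', 'e', 't', 'h', 'e', 'r', 'i', 't', 'e'] (by decide)
    have hs_white := hsingle ['w', 'h', 'i', 't', 'e'] (by decide)
    have hs_orange := hsingle ['o', 'r', 'a', 'n', 'g', 'e'] (by decide)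
    have hs_magenta := hsingle ['m', 'a', 'g', 'e', 'n', 't', 'a'] (by decide)
    have hs_yellow := hsingle ['y', 'e', 'l', 'l', 'o', 'w'] (by decide)
    have hs_lime := hsingle ['l', 'i', 'm', 'e'] (by decide)
    have hs_pink := hsingle ['p', 'i', 'n', 'k'] (by decide)
    have hs_gray := hsingle ['g', 'r', 'a', 'y'] (by decide)
    have hs_cyan := hsingle ['c', 'y', 'a', 'n'] (by decide)
    have hs_purple := hsingle ['p', 'u', 'r', 'p', 'l', 'e'] (by decide)
    have hs_blue := hsingle ['b', 'l', 'u', 'e'] (by decide)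
    have hs_brown := hsingle ['b', 'r', 'o', 'w', 'n'] (by decide)
    have hs_green := hsingle ['g', 'r', 'e', 'e', 'n'] (by decide)
    have hs_red := hsingle ['r', 'e', 'd'] (by decide)
    have hs_black := hsingle ['b', 'l', 'a', 'c', 'k'] (by decide)
    have hs_oak := hsingle ['o', 'a', 'k'] (by decide)
    have hs_spruce := hsingle ['s', 'p', 'r', 'u', 'c', 'e'] (by decide)
    have hs_birch := hsingle ['b', 'i', 'r', 'c', 'h'] (by decide)
    have hs_jungle := hsingle ['j', 'u', 'n', 'g', 'l', 'e'] (by decide)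
    have hs_acacia := hsingle ['a', 'c', 'a', 'c', 'i', 'a'] (by decide)
    have hs_mangrove := hsingle ['m', 'a', 'n', 'g', 'r', 'o', 'v', 'e'] (by decide)
    have hs_cherry := hsingle ['c', 'h', 'e', 'r', 'r', 'y'] (by decide)
    have hs_bamboo := hsingle ['b', 'a', 'm', 'b', 'o', 'o'] (by decide)
    have hs_crimson := hsingle ['c', 'r', 'i', 'm', 's', 'o', 'n'] (by decide)
    have hs_warped := hsingle ['w', 'a', 'r', 'p', 'e', 'd'] (by decide)
    have ha_light_blue := hdouble ['l', 'i', 'g', 'h', 't', '_', 'b', 'l', 'u', 'e'] ['l', 'i', 'g', 'h', 't'] ['b', 'l', 'u', 'e'] (by decide) (by decide)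
    have hb_light_blue := hbdouble ['l', 'i', 'g', 'h', 't', '_', 'b', 'l', 'u', 'e'] ['l', 'i', 'g', 'h', 't'] ['b', 'l', 'u', 'e'] (by decide) (by decide)
    have ha_light_gray := hdouble ['l', 'i', 'g', 'h', 't', '_', 'g', 'r', 'a', 'y'] ['l', 'i', 'g', 'h', 't'] ['g', 'r', 'a', 'y'] (by decide) (by decide)
    have hb_light_gray := hbdouble ['l', 'i', 'g', 'h', 't', '_', 'g', 'r', 'a', 'y'] ['l', 'i', 'g', 'h', 't'] ['g', 'r', 'a', 'y'] (by decide) (by decide)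
    have ha_dark_oak := hdouble ['d', 'a', 'r', 'k', '_', 'o', 'a', 'k'] ['d', 'a', 'r', 'k'] ['o', 'a', 'k'] (by decide) (by decide)
    have hb_dark_oak := hbdouble ['d', 'a', 'r', 'k', '_', 'o', 'a', 'k'] ['d', 'a', 'r', 'k'] ['o', 'a', 'k'] (by decide) (by decide)
    have ha_pale_oak := hdouble ['p', 'a', 'l', 'e', '_', 'o', 'a', 'k'] ['p', 'a', 'l', 'e'] ['o', 'a', 'k'] (by decide) (by decide)
    have hb_pale_oak := hbdouble ['p', 'a', 'l', 'e', '_', 'o', 'a', 'k'] ['p', 'a', 'l', 'e'] ['o', 'a', 'k'] (by decide) (by decide)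
    rcases ts with _ | ⟨t3, ts'⟩
    · simp only [sort_key_item, pvFindPrefix, pvMaterialItems, pvColorOrderItems,
        pvWoodOrderItems, hs_wooden, hs_stone, hs_iron, hs_golden, hs_gold, hs_diamond, hs_netherite, hs_white, hs_orange, hs_magenta, hs_yellow, hs_lime, hs_pink, hs_gray, hs_cyan, hs_purple, hs_blue, hs_brown, hs_green, hs_red, hs_black, hs_oak, hs_spruce, hs_birch, hs_jungle, hs_acacia, hs_mangrove, hs_cherry, hs_bamboo, hs_crimson, hs_warped,
        ha_light_blue, ha_light_gray, ha_dark_oak, ha_pale_oak,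
        List.length_nil, decide_eq_false (show ¬ ((1:Nat) ≤ 0) by omega), Bool.and_false]
      simp only [sort_key_item_alt, pvSplitOn_eq, h, pvItemCode_eq, PySem.Dict.get?_mk_cons,
        List.length_nil]
      clear hsingle hdouble hbdouble hnu h
      rcases eq_or_ne t1 (['w', 'o', 'o', 'd', 'e', 'n'] : List Char) with hk0 | hk0
      · subst hk0; simp [PySem.Dict.get?]
      rcases eq_or_ne t1 (['s', 't', 'o', 'n', 'e'] : List Char) with hk1 | hk1
      · subst hk1; simp [PySem.Dict.get?]
      rcases eq_or_ne t1 (['i', 'r', 'o', 'n'] : List Char) with hk2 | hk2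
      · subst hk2; simp [PySem.Dict.get?]
      rcases eq_or_ne t1 (['g', 'o', 'l', 'd', 'e', 'n'] : List Char) with hk3 | hk3
      · subst hk3; simp [PySem.Dict.get?]
      rcases eq_or_ne t1 (['g', 'o', 'l', 'd'] : List Char) with hk4 | hk4
      · subst hk4; simp [PySem.Dict.get?]
      rcases eq_or_ne t1 (['d', 'i', 'a', 'm', 'o', 'n', 'd'] : List Char) with hk5 | hk5
      · subst hk5; simp [PySem.Dict.get?]
      rcases eq_or_ne t1 (['n', 'e', 't', 'h', 'e', 'r', 'i', 't', 'e'] : List Char) with hk6 | hk6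
      · subst hk6; simp [PySem.Dict.get?]
      rcases eq_or_ne t1 (['w', 'h', 'i', 't', 'e'] : List Char) with hk7 | hk7
      · subst hk7; simp [PySem.Dict.get?]
      rcases eq_or_ne t1 (['o', 'r', 'a', 'n', 'g', 'e'] : List Char) with hk8 | hk8
      · subst hk8; simp [PySem.Dict.get?]
      rcases eq_or_ne t1 (['m', 'a', 'g', 'e', 'n', 't', 'a'] : List Char) with hk9 | hk9
      · subst hk9; simp [PySem.Dict.get?]
      rcases eq_or_ne t1 (['y', 'e', 'l', 'l', 'o', 'w'] : List Char) with hk10 | hk10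
      · subst hk10; simp [PySem.Dict.get?]
      rcases eq_or_ne t1 (['l', 'i', 'm', 'e'] : List Char) with hk11 | hk11
      · subst hk11; simp [PySem.Dict.get?]
      rcases eq_or_ne t1 (['p', 'i', 'n', 'k'] : List Char) with hk12 | hk12
      · subst hk12; simp [PySem.Dict.get?]
      rcases eq_or_ne t1 (['g', 'r', 'a', 'y'] : List Char) with hk13 | hk13
      · subst hk13; simp [PySem.Dict.get?]
      rcases eq_or_ne t1 (['c', 'y', 'a', 'n'] : List Char) with hk14 | hk14
      · subst hk14; simp [PySem.Dict.get?]
      rcases eq_or_ne t1 (['p', 'u', 'r', 'p', 'l', 'e'] : List Char) with hk15 | hk15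
      · subst hk15; simp [PySem.Dict.get?]
      rcases eq_or_ne t1 (['b', 'l', 'u', 'e'] : List Char) with hk16 | hk16
      · subst hk16; simp [PySem.Dict.get?]
      rcases eq_or_ne t1 (['b', 'r', 'o', 'w', 'n'] : List Char) with hk17 | hk17
      · subst hk17; simp [PySem.Dict.get?]
      rcases eq_or_ne t1 (['g', 'r', 'e', 'e', 'n'] : List Char) with hk18 | hk18
      · subst hk18; simp [PySem.Dict.get?]
      rcases eq_or_ne t1 (['r', 'e', 'd'] : List Char) with hk19 | hk19
      · subst hk19; simp [PySem.Dict.get?]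
      rcases eq_or_ne t1 (['b', 'l', 'a', 'c', 'k'] : List Char) with hk20 | hk20
      · subst hk20; simp [PySem.Dict.get?]
      rcases eq_or_ne t1 (['o', 'a', 'k'] : List Char) with hk21 | hk21
      · subst hk21; simp [PySem.Dict.get?]
      rcases eq_or_ne t1 (['s', 'p', 'r', 'u', 'c', 'e'] : List Char) with hk22 | hk22
      · subst hk22; simp [PySem.Dict.get?]
      rcases eq_or_ne t1 (['b', 'i', 'r', 'c', 'h'] : List Char) with hk23 | hk23
      · subst hk23; simp [PySem.Dict.get?]
      rcases eq_or_ne t1 (['j', 'u', 'n', 'g', 'l', 'e'] : List Char) with hk24 | hk24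
      · subst hk24; simp [PySem.Dict.get?]
      rcases eq_or_ne t1 (['a', 'c', 'a', 'c', 'i', 'a'] : List Char) with hk25 | hk25
      · subst hk25; simp [PySem.Dict.get?]
      rcases eq_or_ne t1 (['m', 'a', 'n', 'g', 'r', 'o', 'v', 'e'] : List Char) with hk26 | hk26
      · subst hk26; simp [PySem.Dict.get?]
      rcases eq_or_ne t1 (['c', 'h', 'e', 'r', 'r', 'y'] : List Char) with hk27 | hk27
      · subst hk27; simp [PySem.Dict.get?]
      rcases eq_or_ne t1 (['b', 'a', 'm', 'b', 'o', 'o'] : List Char) with hk28 | hk28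
      · subst hk28; simp [PySem.Dict.get?]
      rcases eq_or_ne t1 (['c', 'r', 'i', 'm', 's', 'o', 'n'] : List Char) with hk29 | hk29
      · subst hk29; simp [PySem.Dict.get?]
      rcases eq_or_ne t1 (['w', 'a', 'r', 'p', 'e', 'd'] : List Char) with hk30 | hk30
      · subst hk30; simp [PySem.Dict.get?]
      simp [PySem.Dict.get?, beq_eq_false_iff_ne.mpr (Ne.symm hk0), beq_eq_false_iff_ne.mpr (Ne.symm hk1), beq_eq_false_iff_ne.mpr (Ne.symm hk2), beq_eq_false_iff_ne.mpr (Ne.symm hk3), beq_eq_false_iff_ne.mpr (Ne.symm hk4), beq_eq_false_iff_ne.mpr (Ne.symm hk5), beq_eq_false_iff_ne.mpr (Ne.symm hk6), beq_eq_false_iff_ne.mpr (Ne.symm hk7), beq_eq_false_iff_ne.mpr (Ne.symm hk8), beq_eq_false_iff_ne.mpr (Ne.symm hk9), beq_eq_false_iff_ne.mpr (Ne.symm hk10), beq_eq_false_iff_ne.mpr (Ne.symm hk11), beq_eq_false_iff_ne.mpr (Ne.symm hk12), beq_eq_false_iff_ne.mpr (Ne.symm hk13), beq_eq_false_iff_ne.mpr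 (Ne.symm hk14), beq_eq_false_iff_ne.mpr (Ne.symm hk15), beq_eq_false_iff_ne.mpr (Ne.symm hk16), beq_eq_false_iff_ne.mpr (Ne.symm hk17), beq_eq_false_iff_ne.mpr (Ne.symm hk18), beq_eq_false_iff_ne.mpr (Ne.symm hk19), beq_eq_false_iff_ne.mpr (Ne.symm hk20), beq_eq_false_iff_ne.mpr (Ne.symm hk21), beq_eq_false_iff_ne.mpr (Ne.symm hk22), beq_eq_false_iff_ne.mpr (Ne.symm hk23), beq_eq_false_iff_ne.mpr (Ne.symm hk24), beq_eq_false_iff_ne.mpr (Ne.symm hk25), beq_eq_false_iff_ne.mpr (Ne.symm hk26), beq_eq_false_iff_ne.mpr (Ne.symm hk27), beq_eq_false_iff_ne.mpr (Ne.symm hk28), beq_eq_false_iff_ne.mpr (Ne.symm hk29), beq_eq_false_iff_ne.mpr (Ne.symm hk30), hdf ['l', 'i', 'g', 'h', 't', '_', 'b', 'l', 'u', 'e'] (by decide), hdf ['l', 'i', 'g', 'h', 't', '_', 'g', 'r', 'a', 'y'] (by decide), hdf ['d', 'a', 'r', 'k', '_', 'o', 'a', 'k'] (by decide), hdf ['p',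 'a', 'l', 'e', '_', 'o', 'a', 'k'] (by decide)]
    · simp only [sort_key_item, pvFindPrefix, pvMaterialItems, pvColorOrderItems,
        pvWoodOrderItems, hs_wooden, hs_stone, hs_iron, hs_golden, hs_gold, hs_diamond, hs_netherite, hs_white, hs_orange, hs_magenta, hs_yellow, hs_lime, hs_pink, hs_gray, hs_cyan, hs_purple, hs_blue, hs_brown, hs_green, hs_red, hs_black, hs_oak, hs_spruce, hs_birch, hs_jungle, hs_acacia, hs_mangrove, hs_cherry, hs_bamboo, hs_crimson, hs_warped,
        ha_light_blue, ha_light_gray, ha_dark_oak, ha_pale_oak,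
        List.length_cons, decide_eq_true (show 1 ≤ ts'.length + 1 by omega), Bool.and_true]
      simp only [sort_key_item_alt, pvSplitOn_eq, h, pvItemCode_eq, PySem.Dict.get?_mk_cons,
        List.length_cons,
        hb_light_blue, hb_light_gray, hb_dark_oak, hb_pale_oak,
        hsf ['w', 'o', 'o', 'd', 'e', 'n'] (by decide), hsf ['s', 't', 'o', 'n', 'e'] (by decide), hsf ['i', 'r', 'o', 'n'] (by decide), hsf ['g', 'o', 'l', 'd', 'e', 'n'] (by decide), hsf ['g', 'o', 'l', 'd'] (by decide), hsf ['d', 'i', 'a', 'm', 'o', 'n', 'd'] (by decide), hsf ['n', 'e', 't', 'h', 'e', 'r', 'i', 't', 'e'] (by decide), hsf ['w', 'h', 'i', 't', 'e'] (by decide), hsf ['o', 'r', 'a', 'n', 'g', 'e'] (by decide), hsf ['m', 'a', 'g', 'e', 'n', 't', 'a'] (by decide), hsf ['y', 'e', 'l', 'l', 'o', 'w'] (by decide), hsf ['l', 'i', 'm', 'e'] (by decide), hsf ['p', 'i', 'n', 'k'] (by decide), hsf ['g', 'r', 'a', 'y'] (by decide), hsf ['c', 'y', 'a', 'n'] (by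 decide), hsf ['p', 'u', 'r', 'p', 'l', 'e'] (by decide), hsf ['b', 'l', 'u', 'e'] (by decide), hsf ['b', 'r', 'o', 'w', 'n'] (by decide), hsf ['g', 'r', 'e', 'e', 'n'] (by decide), hsf ['r', 'e', 'd'] (by decide), hsf ['b', 'l', 'a', 'c', 'k'] (by decide), hsf ['o', 'a', 'k'] (by decide), hsf ['s', 'p', 'r', 'u', 'c', 'e'] (by decide), hsf ['b', 'i', 'r', 'c', 'h'] (by decide), hsf ['j', 'u', 'n', 'g', 'l', 'e'] (by decide), hsf ['a', 'c', 'a', 'c', 'i', 'a'] (by decide), hsf ['m', 'a', 'n', 'g', 'r', 'o', 'v', 'e'] (by decide), hsf ['c', 'h', 'e', 'r', 'r', 'y'] (by decide), hsf ['b', 'a', 'm', 'b', 'o', 'o'] (by decide), hsf ['c', 'r', 'i', 'm', 's', 'o', 'n'] (by decide), hsf ['w', 'a', 'r', 'p', 'e', 'd'] (by decide)]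
      clear hsingle hdouble hbdouble hnu h
      rcases eq_or_ne t1 (['w', 'o', 'o', 'd', 'e', 'n'] : List Char) with hk0 | hk0
      · subst hk0; simp [PySem.Dict.get?]
      rcases eq_or_ne t1 (['s', 't', 'o', 'n', 'e'] : List Char) with hk1 | hk1
      · subst hk1; simp [PySem.Dict.get?]
      rcases eq_or_ne t1 (['i', 'r', 'o', 'n'] : List Char) with hk2 | hk2
      · subst hk2; simp [PySem.Dict.get?]
      rcases eq_or_ne t1 (['g', 'o', 'l', 'd', 'e', 'n'] : List Char) with hk3 | hk3
      · subst hk3; simp [PySem.Dict.get?]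
      rcases eq_or_ne t1 (['g', 'o', 'l', 'd'] : List Char) with hk4 | hk4
      · subst hk4; simp [PySem.Dict.get?]
      rcases eq_or_ne t1 (['d', 'i', 'a', 'm', 'o', 'n', 'd'] : List Char) with hk5 | hk5
      · subst hk5; simp [PySem.Dict.get?]
      rcases eq_or_ne t1 (['n', 'e', 't', 'h', 'e', 'r', 'i', 't', 'e'] : List Char) with hk6 | hk6
      · subst hk6; simp [PySem.Dict.get?]
      rcases eq_or_ne t1 (['w', 'h', 'i', 't', 'e'] : List Char) with hk7 | hk7
      · subst hk7; simp [PySem.Dict.get?]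
      rcases eq_or_ne t1 (['o', 'r', 'a', 'n', 'g', 'e'] : List Char) with hk8 | hk8
      · subst hk8; simp [PySem.Dict.get?]
      rcases eq_or_ne t1 (['m', 'a', 'g', 'e', 'n', 't', 'a'] : List Char) with hk9 | hk9
      · subst hk9; simp [PySem.Dict.get?]
      rcases eq_or_ne t1 (['y', 'e', 'l', 'l', 'o', 'w'] : List Char) with hk10 | hk10
      · subst hk10; simp [PySem.Dict.get?]
      rcases eq_or_ne t1 (['l', 'i', 'm', 'e'] : List Char) with hk11 | hk11
      · subst hk11; simp [PySem.Dict.get?]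
      rcases eq_or_ne t1 (['p', 'i', 'n', 'k'] : List Char) with hk12 | hk12
      · subst hk12; simp [PySem.Dict.get?]
      rcases eq_or_ne t1 (['g', 'r', 'a', 'y'] : List Char) with hk13 | hk13
      · subst hk13; simp [PySem.Dict.get?]
      rcases eq_or_ne t1 (['c', 'y', 'a', 'n'] : List Char) with hk14 | hk14
      · subst hk14; simp [PySem.Dict.get?]
      rcases eq_or_ne t1 (['p', 'u', 'r', 'p', 'l', 'e'] : List Char) with hk15 | hk15
      · subst hk15; simp [PySem.Dict.get?]
      rcases eq_or_ne t1 (['b', 'l', 'u', 'e'] : List Char) with hk16 | hk16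
      · subst hk16; simp [PySem.Dict.get?]
      rcases eq_or_ne t1 (['b', 'r', 'o', 'w', 'n'] : List Char) with hk17 | hk17
      · subst hk17; simp [PySem.Dict.get?]
      rcases eq_or_ne t1 (['g', 'r', 'e', 'e', 'n'] : List Char) with hk18 | hk18
      · subst hk18; simp [PySem.Dict.get?]
      rcases eq_or_ne t1 (['r', 'e', 'd'] : List Char) with hk19 | hk19
      · subst hk19; simp [PySem.Dict.get?]
      rcases eq_or_ne t1 (['b', 'l', 'a', 'c', 'k'] : List Char) with hk20 | hk20
      · subst hk20; simp [PySem.Dict.get?]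
      rcases eq_or_ne t1 (['o', 'a', 'k'] : List Char) with hk21 | hk21
      · subst hk21; simp [PySem.Dict.get?]
      rcases eq_or_ne t1 (['s', 'p', 'r', 'u', 'c', 'e'] : List Char) with hk22 | hk22
      · subst hk22; simp [PySem.Dict.get?]
      rcases eq_or_ne t1 (['b', 'i', 'r', 'c', 'h'] : List Char) with hk23 | hk23
      · subst hk23; simp [PySem.Dict.get?]
      rcases eq_or_ne t1 (['j', 'u', 'n', 'g', 'l', 'e'] : List Char) with hk24 | hk24
      · subst hk24; simp [PySem.Dict.get?]
      rcases eq_or_ne t1 (['a', 'c', 'a', 'c', 'i', 'a'] : List Char) with hk25 | hk25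
      · subst hk25; simp [PySem.Dict.get?]
      rcases eq_or_ne t1 (['m', 'a', 'n', 'g', 'r', 'o', 'v', 'e'] : List Char) with hk26 | hk26
      · subst hk26; simp [PySem.Dict.get?]
      rcases eq_or_ne t1 (['c', 'h', 'e', 'r', 'r', 'y'] : List Char) with hk27 | hk27
      · subst hk27; simp [PySem.Dict.get?]
      rcases eq_or_ne t1 (['b', 'a', 'm', 'b', 'o', 'o'] : List Char) with hk28 | hk28
      · subst hk28; simp [PySem.Dict.get?]
      rcases eq_or_ne t1 (['c', 'r', 'i', 'm', 's', 'o', 'n'] : List Char) with hk29 | hk29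
      · subst hk29; simp [PySem.Dict.get?]
      rcases eq_or_ne t1 (['w', 'a', 'r', 'p', 'e', 'd'] : List Char) with hk30 | hk30
      · subst hk30; simp [PySem.Dict.get?]
      rcases eq_or_ne t1 (['l', 'i', 'g', 'h', 't'] : List Char) with hk31 | hk31
      · subst hk31
        rcases eq_or_ne t2 (['b', 'l', 'u', 'e'] : List Char) with hq31_0 | hq31_0
        · subst hq31_0; simp [PySem.Dict.get?]
        rcases eq_or_ne t2 (['g', 'r', 'a', 'y'] : List Char) with hq31_1 | hq31_1
        · subst hq31_1; simp [PySem.Dict.get?]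
        simp [PySem.Dict.get?, beq_eq_false_iff_ne.mpr (Ne.symm hq31_0), beq_eq_false_iff_ne.mpr (Ne.symm hq31_1)]
      rcases eq_or_ne t1 (['d', 'a', 'r', 'k'] : List Char) with hk32 | hk32
      · subst hk32
        rcases eq_or_ne t2 (['o', 'a', 'k'] : List Char) with hq32_0 | hq32_0
        · subst hq32_0; simp [PySem.Dict.get?]
        simp [PySem.Dict.get?, beq_eq_false_iff_ne.mpr (Ne.symm hq32_0)]
      rcases eq_or_ne t1 (['p', 'a', 'l', 'e'] : List Char) with hk33 | hk33
      · subst hk33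
        rcases eq_or_ne t2 (['o', 'a', 'k'] : List Char) with hq33_0 | hq33_0
        · subst hq33_0; simp [PySem.Dict.get?]
        simp [PySem.Dict.get?, beq_eq_false_iff_ne.mpr (Ne.symm hq33_0)]
      simp [PySem.Dict.get?, beq_eq_false_iff_ne.mpr (Ne.symm hk0), beq_eq_false_iff_ne.mpr (Ne.symm hk1), beq_eq_false_iff_ne.mpr (Ne.symm hk2), beq_eq_false_iff_ne.mpr (Ne.symm hk3), beq_eq_false_iff_ne.mpr (Ne.symm hk4), beq_eq_false_iff_ne.mpr (Ne.symm hk5), beq_eq_false_iff_ne.mpr (Ne.symm hk6), beq_eq_false_iff_ne.mpr (Ne.symm hk7), beq_eq_false_iff_ne.mpr (Ne.symm hk8), beq_eq_false_iff_ne.mpr (Ne.symm hk9), beq_eq_false_iff_ne.mpr (Ne.symm hk10), beq_eq_false_iff_ne.mpr (Ne.symm hk11), beq_eq_false_iff_ne.mpr (Ne.symm hk12), beq_eq_false_iff_ne.mpr (Ne.symm hk13), beq_eq_false_iff_ne.mpr (Ne.symm hk14), beq_eq_false_iff_ne.mpr (Ne.symm hk15), beq_eq_false_iff_ne.mpr (Ne.symm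 hk16), beq_eq_false_iff_ne.mpr (Ne.symm hk17), beq_eq_false_iff_ne.mpr (Ne.symm hk18), beq_eq_false_iff_ne.mpr (Ne.symm hk19), beq_eq_false_iff_ne.mpr (Ne.symm hk20), beq_eq_false_iff_ne.mpr (Ne.symm hk21), beq_eq_false_iff_ne.mpr (Ne.symm hk22), beq_eq_false_iff_ne.mpr (Ne.symm hk23), beq_eq_false_iff_ne.mpr (Ne.symm hk24), beq_eq_false_iff_ne.mpr (Ne.symm hk25), beq_eq_false_iff_ne.mpr (Ne.symm hk26), beq_eq_false_iff_ne.mpr (Ne.symm hk27), beq_eq_false_iff_ne.mpr (Ne.symm hk28), beq_eq_false_iff_ne.mpr (Ne.symm hk29), beq_eq_false_iff_ne.mpr (Ne.symm hk30), beq_eq_false_iff_ne.mpr (Ne.symm hk31), beq_eq_false_iff_ne.mpr (Ne.symm hk32), beq_eq_false_iff_ne.mpr (Ne.symm hk33), hdf ['l', 'i', 'g', 'h', 't', '_', 'b', 'l', 'u', 'e'] (by decide), hdf ['l', 'i', 'g', 'h', 't', '_', 'g', 'r', 'a', 'y'] (by decide), hdf ['d', 'a', 'r', 'k', '_', 'o',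 'a', 'k'] (by decide), hdf ['p', 'a', 'l', 'e', '_', 'o', 'a', 'k'] (by decide)]

-- ===== VERDICT (by name: the statement is the Claim_ definition above) =====
theorem sort_key_item_spec : Claim_equal_sort_key_item := by
  intro item_id _
  exact (pvMain item_id).symm ▸ rfl
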